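-- pv_equiv track=rewrite | github.com/kelvinchanwh/csw-gector | utils/spf_std_mean.py | switchpoint_u
-- ===== SOURCE A (Python) =====
-- def switchpoint_u(tag3d, langtags, langind=1):
--     '''
--     Number of times the tag is switched in an utterance.
--     '''
--     context = None
--     counter = -1
--     for i in tag3d:
--         if i[langind] != context and i[langind] in langtags:
--             counter += 1
--             context = i[langind]
--     return counter
-- ===== SOURCE B (Python) =====
-- def switchpoint_u(tag3d, langtags, langind=1):
--     '''
--     Number of times the tag is switched in an utterance.
--     '''
--     vals = [i[langind] for i in tag3d if i[langind] in langtags]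
--     if not vals:
--         return -1
--     return sum(1 for a, b in zip(vals, vals[1:]) if a != b)
-- ===== Notes on version B (the rewrite author's own statement) =====
-- stated objective: alternative
-- what changed: Instead of threading a running context/counter pair through one loop, B materializes the filtered tag list and counts adjacent differing pairs (run boundaries) in it, returning -1 for an empty filtered list.
import Mathlib
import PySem

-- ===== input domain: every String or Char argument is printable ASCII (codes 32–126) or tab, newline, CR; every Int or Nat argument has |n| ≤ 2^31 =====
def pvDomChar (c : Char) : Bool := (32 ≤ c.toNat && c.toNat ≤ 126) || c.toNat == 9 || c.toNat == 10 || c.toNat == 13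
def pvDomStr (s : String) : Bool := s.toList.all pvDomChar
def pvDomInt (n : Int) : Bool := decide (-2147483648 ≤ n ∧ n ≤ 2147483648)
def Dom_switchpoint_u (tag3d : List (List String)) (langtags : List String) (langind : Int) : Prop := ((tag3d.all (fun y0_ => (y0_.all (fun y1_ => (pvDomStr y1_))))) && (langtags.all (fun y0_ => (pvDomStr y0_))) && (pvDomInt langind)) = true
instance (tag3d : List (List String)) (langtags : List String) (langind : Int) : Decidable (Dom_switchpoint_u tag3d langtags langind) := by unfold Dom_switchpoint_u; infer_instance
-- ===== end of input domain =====

-- B replaces A's single pass threading a context/counter pair by: materialize the filtered tag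
-- list, then count adjacent differing pairs (run boundaries); objective: alternative decomposition.

-- ===== PORT A =====
-- literal transliteration of A: fold over tag3d with state (context, counter);
-- i[langind] is PySem.List.pyGet? (none = IndexError, excluded by Pre_; the fold skips it there)
def switchpoint_u (tag3d : List (List String)) (langtags : List String) (langind : Int) : Int :=
  (tag3d.foldl
    (fun (st : Option String × Int) i =>
      match PySem.List.pyGet? i langind with
      | some v => if some v ≠ st.1 ∧ v ∈ langtags then (some v, st.2 + 1) else st
      | none => st)
    (none, -1)).2

-- ===== PORT B =====
-- transliteration of Source B: vals = [i[langind] for i in tag3d if i[langind] in langtags];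
-- empty → -1, else count of adjacent differing pairs in vals
def switchpoint_u_alt (tag3d : List (List String)) (langtags : List String) (langind : Int) : Int :=
  let vals := tag3d.filterMap
    (fun i => (PySem.List.pyGet? i langind).bind
      (fun v => if v ∈ langtags then some v else none))
  if vals = [] then -1
  else ((vals.zip vals.tail).countP (fun p => p.1 ≠ p.2) : Int)

-- ===== PRECONDITION & SPEC =====
-- Pre_ excludes exactly the inputs where Python A raises IndexError: some row has no
-- valid index langind.
def Pre_switchpoint_u (tag3d : List (List String)) (langtags : List String) (langind : Int) : Prop :=
  ∀ i ∈ tag3d, PySem.Raise.InRange i.length langind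
instance (tag3d : List (List String)) (langtags : List String) (langind : Int) : Decidable (Pre_switchpoint_u tag3d langtags langind) := by unfold Pre_switchpoint_u; infer_instance
def pvWitness_switchpoint_u : List (List String) × List String × Int :=
  ([["w1", "en"], ["w2", "hi"], ["w3", "en"]], ["en", "hi"], 1)

def Spec_switchpoint_u (tag3d : List (List String)) (langtags : List String) (langind : Int) (out : Int) : Prop := out = switchpoint_u_alt tag3d langtags langind
instance (tag3d : List (List String)) (langtags : List String) (langind : Int) (out : Int) : Decidable (Spec_switchpoint_u tag3d langtags langind out) := by unfold Spec_switchpoint_u; infer_instance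

-- ===== CLAIM (what is proved, stated in full; the proofs are below) =====
def Claim_equal_switchpoint_u : Prop := ∀ (tag3d : List (List String)) (langtags : List String) (langind : Int), Dom_switchpoint_u tag3d langtags langind → Pre_switchpoint_u tag3d langtags langind → Spec_switchpoint_u tag3d langtags langind (switchpoint_u tag3d langtags langind)

-- ===== LEMMAS AND PROOFS =====

-- A's per-word step restricted to the filtered values
def pvStepV (st : Option String × Int) (v : String) : Option String × Int :=
  if some v ≠ st.1 then (some v, st.2 + 1) else st

-- number of run starts of vs when the previous value is ctx
def pvRuns : Option String → List String → Int
  | _, [] => 0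
  | ctx, v :: vs => (if some v ≠ ctx then 1 else 0) + pvRuns (some v) vs

-- Under Pre_, A's fold over tag3d equals the fold of pvStepV over the filtered list
theorem pv_fold_filter (tag3d : List (List String)) (langtags : List String) (langind : Int)
    (st : Option String × Int)
    (hpre : ∀ i ∈ tag3d, PySem.Raise.InRange i.length langind) :
    tag3d.foldl
      (fun (st : Option String × Int) i =>
        match PySem.List.pyGet? i langind with
        | some v => if some v ≠ st.1 ∧ v ∈ langtags then (some v, st.2 + 1) else st
        | none => st) st
    = (tag3d.filterMap
        (fun i => (PySem.List.pyGet? i langind).bind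
          (fun v => if v ∈ langtags then some v else none))).foldl pvStepV st := by
  induction tag3d generalizing st with
  | nil => rfl
  | cons i rest ih =>
    have hin : PySem.Raise.InRange i.length langind := hpre i (by simp)
    obtain ⟨v, hv⟩ : ∃ v, PySem.List.pyGet? i langind = some v := by
      cases h : PySem.List.pyGet? i langind with
      | none => exact absurd ((PySem.List.pyGet?_eq_none_iff _ _).1 h) (not_not.2 hin)
      | some v => exact ⟨v, rfl⟩
    have hrest : ∀ j ∈ rest, PySem.Raise.InRange j.length langind :=
      fun j hj => hpre j (by simp [hj])
    by_cases hm : v ∈ langtags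
    · simp only [List.foldl_cons, List.filterMap_cons, hv, Option.bind_some, if_pos hm]
      rw [ih _ hrest]
      simp only [pvStepV]
      by_cases hc : some v ≠ st.1 <;> simp [hc, hm]
    · simp only [List.foldl_cons, List.filterMap_cons, hv, Option.bind_some, if_neg hm]
      rw [ih _ hrest]
      have : (some v ≠ st.1 ∧ v ∈ langtags) = False := by simp [hm]
      simp [this]

theorem pv_fold_runs (vs : List String) (ctx : Option String) (c : Int) :
    (vs.foldl pvStepV (ctx, c)).2 = c + pvRuns ctx vs := by
  induction vs generalizing ctx c with
  | nil => simp [pvRuns]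
  | cons v rest ih =>
    simp only [List.foldl_cons, pvStepV, pvRuns]
    by_cases hc : some v ≠ ctx
    · simp only [if_pos hc]
      rw [ih]
      omega
    · simp only [if_neg hc]
      rw [ih]
      simp at hc
      subst hc
      simp

theorem pv_runs_countP (vs : List String) (a : String) :
    pvRuns (some a) vs = (((a :: vs).zip vs).countP (fun p => p.1 ≠ p.2) : Int) := by
  induction vs generalizing a with
  | nil => simp [pvRuns]
  | cons v rest ih =>
    simp only [pvRuns, List.zip_cons_cons, List.countP_cons, ih v]
    by_cases h : a = v
    · subst h; simp
    · have h' : some v ≠ some a := by simp [Ne.symm h]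
      simp [h', h]
      ring

-- ===== VERDICT (by name: the statement is the Claim_ definition above) =====
theorem switchpoint_u_spec : Claim_equal_switchpoint_u := by
  intro tag3d langtags langind _hdom hpre
  unfold Spec_switchpoint_u switchpoint_u switchpoint_u_alt
  rw [pv_fold_filter tag3d langtags langind _ hpre]
  generalize (tag3d.filterMap
      (fun i => (PySem.List.pyGet? i langind).bind
        (fun v => if v ∈ langtags then some v else none))) = vals
  cases vals with
  | nil => simp
  | cons v rest =>
    simp only [List.foldl_cons, List.tail_cons, pvStepV]
    have hne : some v ≠ (none : Option String) := by simp
    simp only [if_pos hne]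
    rw [pv_fold_runs, pv_runs_countP rest v]
    simp
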